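-- pv_equiv track=rewrite | github.com/ashudnsingh/CodeSignal | Graphs/Kingdom Roads/007 - citiesConquering.py | citiesConquering
-- ===== SOURCE A (Python) =====
-- def citiesConquering(n, e):
--     r = range(n)
--     ans = [-1] * n
--     for i in r:
--         for x in r:
--             f = 0
--             for u, v in e:
--                 if u == x or v == x:
--                     f += ans[u + v - x] == -1 or ans[u + v - x] == i + 1
--
--             if f < 2 and ans[x] == -1: ans[x] = i + 1
--
--     return ans
-- ===== SOURCE B (Python) =====
-- def citiesConquering(n, e):
--     adj = {}
--     for u, v in e:
--         if u == v:
--             adj.setdefault(u, []).append(u)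
--         else:
--             adj.setdefault(u, []).append(v)
--             adj.setdefault(v, []).append(u)
--     ans = [-1] * n
--     for i in range(n):
--         for x in range(n):
--             if ans[x] == -1 and sum(ans[y] == -1 or ans[y] == i + 1 for y in adj.get(x, [])) < 2:
--                 ans[x] = i + 1
--     return ans
-- ===== Notes on version B (the rewrite author's own statement) =====
-- stated objective: faster
-- what changed: B builds adjacency lists once in a single pass over the edges (dict of neighbour lists) so each city's per-round check scans only its own neighbours instead of rescanning the whole edge list, and skips already-conquered cities before counting.
import Mathlib
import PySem

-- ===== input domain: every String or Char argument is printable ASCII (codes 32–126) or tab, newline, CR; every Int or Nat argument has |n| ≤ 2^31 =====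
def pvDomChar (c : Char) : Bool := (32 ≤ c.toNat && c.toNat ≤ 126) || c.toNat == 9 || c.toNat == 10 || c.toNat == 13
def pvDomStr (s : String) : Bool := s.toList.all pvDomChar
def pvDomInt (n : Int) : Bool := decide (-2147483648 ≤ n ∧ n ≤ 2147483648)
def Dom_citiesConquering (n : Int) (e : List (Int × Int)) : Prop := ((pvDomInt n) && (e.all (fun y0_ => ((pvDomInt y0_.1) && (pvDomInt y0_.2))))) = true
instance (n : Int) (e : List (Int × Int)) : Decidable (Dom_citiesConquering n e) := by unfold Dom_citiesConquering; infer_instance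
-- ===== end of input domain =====

-- B builds adjacency lists once so each round scans only incident edges per city, instead of A's full edge rescan per city per round.

-- `ans[y] == -1 or ans[y] == i + 1` added as an int; the identical expression occurs in both Pythons
def pvInd (ans : List Int) (i y : Int) : Int :=
  if PySem.List.pyGetD ans y (-2) == -1 || PySem.List.pyGetD ans y (-2) == i + 1 then 1 else 0

-- ===== PORT A =====
-- the inner `for u, v in e` loop of A computing f for city x in round i
def pvA_f (e : List (Int × Int)) (ans : List Int) (x i : Int) : Int :=
  e.foldl (fun f p =>
    if p.1 == x || p.2 == x then f + pvInd ans i (p.1 + p.2 - x) else f) 0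

def citiesConquering (n : Int) (e : List (Int × Int)) : List Int :=
  let r := PySem.List.pyRange 0 n 1
  let ans := List.replicate n.toNat (-1)
  r.foldl (fun ans i =>
    r.foldl (fun ans x =>
      let f := pvA_f e ans x i
      if f < 2 && (PySem.List.pyGetD ans x (-2) == -1)
      then PySem.List.pySetD ans x (i + 1) else ans) ans) ans

-- ===== PORT B =====
-- per-edge step of B's adjacency-building loop; `adj.setdefault(k, []).append(y)` = `d.modify k [] (· ++ [y])` (append to the list under k, starting from [] when k is absent)
def pvB_adjStep (d : PySem.Dict Int (List Int)) (p : Int × Int) : PySem.Dict Int (List Int) :=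
  if p.1 == p.2 then d.modify p.1 [] (· ++ [p.1])
  else (d.modify p.1 [] (· ++ [p.2])).modify p.2 [] (· ++ [p.1])

def citiesConquering_alt (n : Int) (e : List (Int × Int)) : List Int :=
  let adj := e.foldl pvB_adjStep PySem.Dict.empty
  let ans := List.replicate n.toNat (-1)
  (PySem.List.pyRange 0 n 1).foldl (fun ans i =>
    (PySem.List.pyRange 0 n 1).foldl (fun ans x =>
      if (PySem.List.pyGetD ans x (-2) == -1)
         && ((adj.getD x []).foldl (fun s y => s + pvInd ans i y) 0 < 2)
      then PySem.List.pySetD ans x (i + 1) else ans) ans) ans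

-- ===== PRECONDITION & SPEC =====
-- Pre_ excludes exactly the inputs where A raises IndexError: an edge whose one endpoint is a
-- city 0..n-1 while the other endpoint is outside Python's index range [-n, n) for the ans list.
def Pre_citiesConquering (n : Int) (e : List (Int × Int)) : Prop :=
  ∀ p ∈ e, 0 < n →
    ((0 ≤ p.1 ∧ p.1 < n) → (-n ≤ p.2 ∧ p.2 < n)) ∧
    ((0 ≤ p.2 ∧ p.2 < n) → (-n ≤ p.1 ∧ p.1 < n))
instance (n : Int) (e : List (Int × Int)) : Decidable (Pre_citiesConquering n e) := by
  unfold Pre_citiesConquering; infer_instance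
def pvWitness_citiesConquering : Int × (List (Int × Int)) := (3, [(0, 1), (1, 2)])

def Spec_citiesConquering (n : Int) (e : List (Int × Int)) (out : List Int) : Prop := out = citiesConquering_alt n e
instance (n : Int) (e : List (Int × Int)) (out : List Int) : Decidable (Spec_citiesConquering n e out) := by unfold Spec_citiesConquering; infer_instance

-- ===== CLAIM (what is proved, stated in full; the proofs are below) =====
def Claim_equal_citiesConquering : Prop := ∀ (n : Int) (e : List (Int × Int)), Dom_citiesConquering n e → Pre_citiesConquering n e → Spec_citiesConquering n e (citiesConquering n e)

-- ===== LEMMAS AND PROOFS =====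

-- the other endpoints of x's incident edges, in edge order
def pvOthers (x : Int) (e : List (Int × Int)) : List Int :=
  e.filterMap (fun p => if p.1 == x || p.2 == x then some (p.1 + p.2 - x) else none)

theorem pvOthers_cons (x : Int) (p : Int × Int) (tl : List (Int × Int)) :
    pvOthers x (p :: tl)
      = (if p.1 == x || p.2 == x then [p.1 + p.2 - x] else []) ++ pvOthers x tl := by
  unfold pvOthers
  rw [List.filterMap_cons]
  split <;> simp_all

theorem pvA_f_eq_sum (e : List (Int × Int)) (ans : List Int) (x i : Int) :
    pvA_f e ans x i = ((pvOthers x e).map (pvInd ans i)).sum := by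
  have h : ∀ acc : Int,
      e.foldl (fun f p =>
        if p.1 == x || p.2 == x then f + pvInd ans i (p.1 + p.2 - x) else f) acc
        = acc + ((pvOthers x e).map (pvInd ans i)).sum := by
    induction e with
    | nil => intro acc; simp [pvOthers]
    | cons p tl ih =>
      intro acc
      rw [List.foldl_cons, ih, pvOthers_cons]
      by_cases hpx : (p.1 == x || p.2 == x) = true
      · rw [if_pos hpx, if_pos hpx]; simp; ring
      · rw [if_neg hpx, if_neg hpx]; simp
  simpa [pvA_f] using h 0

theorem pvB_sum (l : List Int) (ans : List Int) (i : Int) :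
    l.foldl (fun s y => s + pvInd ans i y) 0 = (l.map (pvInd ans i)).sum := by
  have h : ∀ acc : Int, l.foldl (fun s y => s + pvInd ans i y) acc
      = acc + (l.map (pvInd ans i)).sum := by
    induction l with
    | nil => intro acc; simp
    | cons y tl ih => intro acc; rw [List.foldl_cons, ih]; simp; ring
  simpa using h 0

theorem pvAdjStep_getD (d : PySem.Dict Int (List Int)) (p : Int × Int) (x : Int) :
    (pvB_adjStep d p).getD x []
      = d.getD x [] ++ (if p.1 == x || p.2 == x then [p.1 + p.2 - x] else []) := by
  unfold pvB_adjStep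
  by_cases huv : p.1 = p.2
  · rw [if_pos (by simpa using huv), PySem.Dict.getD_modify]
    by_cases hx : x = p.1
    · subst hx
      have harith : p.1 + p.2 - p.1 = p.1 := by omega
      simp [harith]
    · have h1 : ¬ p.1 = x := by omega
      have h2 : ¬ p.2 = x := by omega
      rw [if_neg hx]
      simp [h1, h2]
  · rw [if_neg (by simpa using huv), PySem.Dict.getD_modify]
    by_cases h2 : x = p.2
    · subst h2
      rw [if_pos rfl, PySem.Dict.getD_modify, if_neg (show ¬ p.2 = p.1 by omega),
          if_pos (show (p.1 == p.2 || p.2 == p.2) = true by simp),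
          show p.1 + p.2 - p.2 = p.1 by omega]
    · rw [if_neg h2, PySem.Dict.getD_modify]
      by_cases h1 : x = p.1
      · subst h1
        rw [if_pos rfl,
            if_pos (show (p.1 == p.1 || p.2 == p.1) = true by simp),
            show p.1 + p.2 - p.1 = p.2 by omega]
      · rw [if_neg h1]
        have a : ¬ p.1 = x := by omega
        have b : ¬ p.2 = x := by omega
        simp [a, b]

theorem pvAdj_getD (e : List (Int × Int)) (d : PySem.Dict Int (List Int)) (x : Int) :
    (e.foldl pvB_adjStep d).getD x [] = d.getD x [] ++ pvOthers x e := by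
  induction e generalizing d with
  | nil => simp [pvOthers]
  | cons p tl ih =>
    rw [List.foldl_cons, ih, pvAdjStep_getD, pvOthers_cons, List.append_assoc]

-- ===== VERDICT (by name: the statement is the Claim_ definition above) =====
theorem citiesConquering_spec : Claim_equal_citiesConquering := by
  intro n e _hdom _hpre
  unfold Spec_citiesConquering
  simp only [citiesConquering, citiesConquering_alt]
  have hstep : ∀ (ans : List Int) (i x : Int),
      (if pvA_f e ans x i < 2 && (PySem.List.pyGetD ans x (-2) == -1)
       then PySem.List.pySetD ans x (i + 1) else ans)
      = (if (PySem.List.pyGetD ans x (-2) == -1)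
            && (((e.foldl pvB_adjStep PySem.Dict.empty).getD x []).foldl
                  (fun s y => s + pvInd ans i y) 0 < 2)
         then PySem.List.pySetD ans x (i + 1) else ans) := by
    intro ans i x
    rw [pvAdj_getD, PySem.Dict.getD_empty, List.nil_append, pvB_sum, ← pvA_f_eq_sum, Bool.and_comm]
  simp only [hstep]
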